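-- pv_equiv track=rewrite | github.com/mikkisingh/webjam2025 | backend/pipeline/config.py | get_category_for_code
-- ===== SOURCE A (Python) =====
-- CATEGORY_RANGES = [
--     (   100,  1999, "Anesthesia"),
--     ( 10004, 10021, "Surgery - General"),
--     ( 10030, 19499, "Surgery - Integumentary"),
--     ( 20005, 29999, "Surgery - Musculoskeletal"),
--     ( 30000, 32999, "Surgery - Respiratory"),
--     ( 33010, 37799, "Surgery - Cardiovascular"),
--     ( 38100, 38999, "Surgery - Hemic/Lymphatic"),
--     ( 39000, 39599, "Surgery - Mediastinum/Diaphragm"),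
--     ( 40490, 49999, "Surgery - Digestive"),
--     ( 50010, 53899, "Surgery - Urinary"),
--     ( 54000, 55899, "Surgery - Male Genital"),
--     ( 55920, 58999, "Surgery - Female Genital"),
--     ( 59000, 59899, "Surgery - Maternity"),
--     ( 60000, 60699, "Surgery - Endocrine"),
--     ( 61000, 64999, "Surgery - Nervous System"),
--     ( 65091, 68899, "Surgery - Eye/Ocular Adnexa"),
--     ( 69000, 69979, "Surgery - Auditory"),
--     ( 70010, 76499, "Radiology - Diagnostic"),
--     ( 76506, 76999, "Radiology - Ultrasound"),
--     ( 77001, 77799, "Radiology - Radiation Oncology"),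
--     ( 77800, 79999, "Radiology - Nuclear Medicine"),
--     ( 80047, 89398, "Laboratory / Pathology"),
--     ( 90281, 90399, "Medicine - Immunizations"),
--     ( 90460, 90474, "Medicine - Immunization Admin"),
--     ( 90785, 90899, "Medicine - Psychiatry"),
--     ( 90901, 90911, "Medicine - Biofeedback"),
--     ( 90935, 90999, "Medicine - Dialysis"),
--     ( 91010, 91299, "Medicine - Gastroenterology"),
--     ( 92002, 92499, "Medicine - Ophthalmology"),
--     ( 92502, 92700, "Medicine - Otorhinolaryngology"),
--     ( 93000, 93799, "Medicine - Cardiovascular"),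
--     ( 93880, 93998, "Medicine - Vascular Studies"),
--     ( 94002, 94799, "Medicine - Pulmonary"),
--     ( 95004, 95199, "Medicine - Allergy/Immunology"),
--     ( 95249, 95999, "Medicine - Neurology"),
--     ( 96040, 96170, "Medicine - Genetics"),
--     ( 96360, 96549, "Medicine - Chemotherapy"),
--     ( 96567, 96571, "Medicine - Photodynamic Therapy"),
--     ( 96900, 96999, "Medicine - Dermatology"),
--     ( 97010, 97799, "Medicine - Physical Therapy"),
--     ( 97802, 97804, "Medicine - Nutrition Therapy"),
--     ( 98925, 98929, "Medicine - Osteopathic"),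
--     ( 98940, 98943, "Medicine - Chiropractic"),
--     ( 99024, 99091, "Medicine - Special Services"),
--     ( 99100, 99140, "Medicine - Anesthesia Qualifying"),
--     ( 99151, 99199, "Medicine - Moderate Sedation"),
--     ( 99201, 99499, "Evaluation & Management"),
-- ]
--
-- def get_category_for_code(hcpcs_code: str) -> str:
--     """Map a numeric HCPCS/CPT code to a category."""
--     try:
--         num = int(hcpcs_code)
--     except ValueError:
--         # Non-numeric codes (A, B, C, E, G, etc.) are HCPCS Level II
--         prefix = hcpcs_code[0].upper() if hcpcs_code else ""
--         return {
--             "A": "HCPCS - Supplies",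
--             "B": "HCPCS - Enteral/Parenteral",
--             "C": "HCPCS - Outpatient PPS",
--             "D": "HCPCS - Dental",
--             "E": "HCPCS - DME",
--             "G": "HCPCS - Procedures/Services",
--             "H": "HCPCS - Behavioral Health",
--             "J": "HCPCS - Drugs",
--             "K": "HCPCS - DME (Temporary)",
--             "L": "HCPCS - Orthotics/Prosthetics",
--             "M": "HCPCS - Quality Measures",
--             "P": "HCPCS - Laboratory",
--             "Q": "HCPCS - Temporary Codes",
--             "R": "HCPCS - Diagnostic Radiology",
--             "S": "HCPCS - Private Payer",
--             "T": "HCPCS - State Medicaid",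
--             "U": "HCPCS - Coronavirus",
--             "V": "HCPCS - Vision/Hearing",
--         }.get(prefix, "Other")
--
--     for lo, hi, cat in CATEGORY_RANGES:
--         if lo <= num <= hi:
--             return cat
--     return "Other"
-- ===== SOURCE B (Python) =====
-- CATEGORY_RANGES = [
--     (   100,  1999, "Anesthesia"),
--     ( 10004, 10021, "Surgery - General"),
--     ( 10030, 19499, "Surgery - Integumentary"),
--     ( 20005, 29999, "Surgery - Musculoskeletal"),
--     ( 30000, 32999, "Surgery - Respiratory"),
--     ( 33010, 37799, "Surgery - Cardiovascular"),
--     ( 38100, 38999, "Surgery - Hemic/Lymphatic"),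
--     ( 39000, 39599, "Surgery - Mediastinum/Diaphragm"),
--     ( 40490, 49999, "Surgery - Digestive"),
--     ( 50010, 53899, "Surgery - Urinary"),
--     ( 54000, 55899, "Surgery - Male Genital"),
--     ( 55920, 58999, "Surgery - Female Genital"),
--     ( 59000, 59899, "Surgery - Maternity"),
--     ( 60000, 60699, "Surgery - Endocrine"),
--     ( 61000, 64999, "Surgery - Nervous System"),
--     ( 65091, 68899, "Surgery - Eye/Ocular Adnexa"),
--     ( 69000, 69979, "Surgery - Auditory"),
--     ( 70010, 76499, "Radiology - Diagnostic"),
--     ( 76506, 76999, "Radiology - Ultrasound"),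
--     ( 77001, 77799, "Radiology - Radiation Oncology"),
--     ( 77800, 79999, "Radiology - Nuclear Medicine"),
--     ( 80047, 89398, "Laboratory / Pathology"),
--     ( 90281, 90399, "Medicine - Immunizations"),
--     ( 90460, 90474, "Medicine - Immunization Admin"),
--     ( 90785, 90899, "Medicine - Psychiatry"),
--     ( 90901, 90911, "Medicine - Biofeedback"),
--     ( 90935, 90999, "Medicine - Dialysis"),
--     ( 91010, 91299, "Medicine - Gastroenterology"),
--     ( 92002, 92499, "Medicine - Ophthalmology"),
--     ( 92502, 92700, "Medicine - Otorhinolaryngology"),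
--     ( 93000, 93799, "Medicine - Cardiovascular"),
--     ( 93880, 93998, "Medicine - Vascular Studies"),
--     ( 94002, 94799, "Medicine - Pulmonary"),
--     ( 95004, 95199, "Medicine - Allergy/Immunology"),
--     ( 95249, 95999, "Medicine - Neurology"),
--     ( 96040, 96170, "Medicine - Genetics"),
--     ( 96360, 96549, "Medicine - Chemotherapy"),
--     ( 96567, 96571, "Medicine - Photodynamic Therapy"),
--     ( 96900, 96999, "Medicine - Dermatology"),
--     ( 97010, 97799, "Medicine - Physical Therapy"),
--     ( 97802, 97804, "Medicine - Nutrition Therapy"),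
--     ( 98925, 98929, "Medicine - Osteopathic"),
--     ( 98940, 98943, "Medicine - Chiropractic"),
--     ( 99024, 99091, "Medicine - Special Services"),
--     ( 99100, 99140, "Medicine - Anesthesia Qualifying"),
--     ( 99151, 99199, "Medicine - Moderate Sedation"),
--     ( 99201, 99499, "Evaluation & Management"),
-- ]
--
-- # The range table flattened once into an ascending step function: at lo the
-- # category starts, at hi+1 it falls back to "Other".  For a number the answer
-- # is the value of the last step whose boundary is <= num ("Other" if none).
-- _STEPS = [p for lo, hi, cat in CATEGORY_RANGES
--           for p in ((lo, cat), (hi + 1, "Other"))]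
--
-- # The prefix dict replaced by a key string + parallel value list.
-- _PREFIX_KEYS = "ABCDEGHJKLMPQRSTUV"
-- _PREFIX_VALS = [
--     "HCPCS - Supplies",
--     "HCPCS - Enteral/Parenteral",
--     "HCPCS - Outpatient PPS",
--     "HCPCS - Dental",
--     "HCPCS - DME",
--     "HCPCS - Procedures/Services",
--     "HCPCS - Behavioral Health",
--     "HCPCS - Drugs",
--     "HCPCS - DME (Temporary)",
--     "HCPCS - Orthotics/Prosthetics",
--     "HCPCS - Quality Measures",
--     "HCPCS - Laboratory",
--     "HCPCS - Temporary Codes",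
--     "HCPCS - Diagnostic Radiology",
--     "HCPCS - Private Payer",
--     "HCPCS - State Medicaid",
--     "HCPCS - Coronavirus",
--     "HCPCS - Vision/Hearing",
-- ]
--
--
-- def get_category_for_code(hcpcs_code: str) -> str:
--     """Map a numeric HCPCS/CPT code to a category (fold over a step table)."""
--     try:
--         num = int(hcpcs_code)
--     except ValueError:
--         if not hcpcs_code:
--             return "Other"
--         i = _PREFIX_KEYS.find(hcpcs_code[0].upper())
--         return _PREFIX_VALS[i] if i >= 0 else "Other"
--     ans = "Other"
--     for b, c in _STEPS:
--         if num >= b: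
--             ans = c
--     return ans
-- ===== Notes on version B (the rewrite author's own statement) =====
-- stated objective: alternative
-- what changed: The early-return scan over (lo,hi,cat) ranges is replaced by a fold over the range table flattened once into an ascending step function ((lo,cat),(hi+1,'Other') pairs), keeping the last step whose boundary is <= num; the prefix dict is replaced by a key string searched with str.find plus a parallel value list.
import Mathlib
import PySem

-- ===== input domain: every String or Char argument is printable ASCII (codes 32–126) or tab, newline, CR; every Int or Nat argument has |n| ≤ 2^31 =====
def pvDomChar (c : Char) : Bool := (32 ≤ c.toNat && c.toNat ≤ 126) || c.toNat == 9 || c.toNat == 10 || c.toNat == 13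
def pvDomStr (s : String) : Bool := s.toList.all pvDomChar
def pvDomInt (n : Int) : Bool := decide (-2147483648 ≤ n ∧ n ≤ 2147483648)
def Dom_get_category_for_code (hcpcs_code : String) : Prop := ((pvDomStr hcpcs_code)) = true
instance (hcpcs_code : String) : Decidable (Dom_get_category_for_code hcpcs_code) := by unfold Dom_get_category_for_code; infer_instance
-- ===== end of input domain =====

-- B flattens the range table once into an ascending step function and folds over it keeping the
-- last step whose boundary is ≤ num, and replaces the prefix dict by a key string + value list.

-- shared module-level constant (CATEGORY_RANGES in config.py, used by both A and B)
def CATEGORY_RANGES : List (Int × Int × String) := [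
  (100, 1999, "Anesthesia"),
  (10004, 10021, "Surgery - General"),
  (10030, 19499, "Surgery - Integumentary"),
  (20005, 29999, "Surgery - Musculoskeletal"),
  (30000, 32999, "Surgery - Respiratory"),
  (33010, 37799, "Surgery - Cardiovascular"),
  (38100, 38999, "Surgery - Hemic/Lymphatic"),
  (39000, 39599, "Surgery - Mediastinum/Diaphragm"),
  (40490, 49999, "Surgery - Digestive"),
  (50010, 53899, "Surgery - Urinary"),
  (54000, 55899, "Surgery - Male Genital"),
  (55920, 58999, "Surgery - Female Genital"),
  (59000, 59899, "Surgery - Maternity"),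
  (60000, 60699, "Surgery - Endocrine"),
  (61000, 64999, "Surgery - Nervous System"),
  (65091, 68899, "Surgery - Eye/Ocular Adnexa"),
  (69000, 69979, "Surgery - Auditory"),
  (70010, 76499, "Radiology - Diagnostic"),
  (76506, 76999, "Radiology - Ultrasound"),
  (77001, 77799, "Radiology - Radiation Oncology"),
  (77800, 79999, "Radiology - Nuclear Medicine"),
  (80047, 89398, "Laboratory / Pathology"),
  (90281, 90399, "Medicine - Immunizations"),
  (90460, 90474, "Medicine - Immunization Admin"),
  (90785, 90899, "Medicine - Psychiatry"),
  (90901, 90911, "Medicine - Biofeedback"),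
  (90935, 90999, "Medicine - Dialysis"),
  (91010, 91299, "Medicine - Gastroenterology"),
  (92002, 92499, "Medicine - Ophthalmology"),
  (92502, 92700, "Medicine - Otorhinolaryngology"),
  (93000, 93799, "Medicine - Cardiovascular"),
  (93880, 93998, "Medicine - Vascular Studies"),
  (94002, 94799, "Medicine - Pulmonary"),
  (95004, 95199, "Medicine - Allergy/Immunology"),
  (95249, 95999, "Medicine - Neurology"),
  (96040, 96170, "Medicine - Genetics"),
  (96360, 96549, "Medicine - Chemotherapy"),
  (96567, 96571, "Medicine - Photodynamic Therapy"),
  (96900, 96999, "Medicine - Dermatology"),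
  (97010, 97799, "Medicine - Physical Therapy"),
  (97802, 97804, "Medicine - Nutrition Therapy"),
  (98925, 98929, "Medicine - Osteopathic"),
  (98940, 98943, "Medicine - Chiropractic"),
  (99024, 99091, "Medicine - Special Services"),
  (99100, 99140, "Medicine - Anesthesia Qualifying"),
  (99151, 99199, "Medicine - Moderate Sedation"),
  (99201, 99499, "Evaluation & Management")
]

-- ===== PORT A =====
-- the inline dict literal of A's except-branch
def prefixDictA : PySem.Dict String String := PySem.Dict.ofList [
  ("A", "HCPCS - Supplies"),
  ("B", "HCPCS - Enteral/Parenteral"),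
  ("C", "HCPCS - Outpatient PPS"),
  ("D", "HCPCS - Dental"),
  ("E", "HCPCS - DME"),
  ("G", "HCPCS - Procedures/Services"),
  ("H", "HCPCS - Behavioral Health"),
  ("J", "HCPCS - Drugs"),
  ("K", "HCPCS - DME (Temporary)"),
  ("L", "HCPCS - Orthotics/Prosthetics"),
  ("M", "HCPCS - Quality Measures"),
  ("P", "HCPCS - Laboratory"),
  ("Q", "HCPCS - Temporary Codes"),
  ("R", "HCPCS - Diagnostic Radiology"),
  ("S", "HCPCS - Private Payer"),
  ("T", "HCPCS - State Medicaid"),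
  ("U", "HCPCS - Coronavirus"),
  ("V", "HCPCS - Vision/Hearing")
]

-- `hcpcs_code[0].upper() if hcpcs_code else ""` (s[0] exists exactly when s is nonempty)
def prefixOfA (s : String) : String :=
  if s.toList = [] then ""
  else
    match PySem.Str.pyGet? s 0 with
    | some c => PySem.Str.upper (String.ofList [c])
    | none => ""

-- `for lo, hi, cat in CATEGORY_RANGES: if lo <= num <= hi: return cat` / `return "Other"`
def findCatA : List (Int × Int × String) → Int → String
  | [], _ => "Other"
  | (lo, hi, cat) :: rest, n => if lo ≤ n ∧ n ≤ hi then cat else findCatA rest n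

def get_category_for_code (hcpcs_code : String) : String :=
  match PySem.Int.ofStr? hcpcs_code with
  | none => prefixDictA.getD (prefixOfA hcpcs_code) "Other"
  | some num => findCatA CATEGORY_RANGES num

-- ===== PORT B =====
-- _STEPS = [p for lo, hi, cat in CATEGORY_RANGES for p in ((lo, cat), (hi + 1, "Other"))]
def stepsOfB (r : Int × Int × String) : List (Int × String) := [(r.1, r.2.2), (r.2.1 + 1, "Other")]

def stepsB : List (Int × String) := CATEGORY_RANGES.flatMap stepsOfB

-- _PREFIX_KEYS / _PREFIX_VALS (module-level in Source B)
def prefixKeysB : String := "ABCDEGHJKLMPQRSTUV"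

def prefixValsB : List String := [
  "HCPCS - Supplies",
  "HCPCS - Enteral/Parenteral",
  "HCPCS - Outpatient PPS",
  "HCPCS - Dental",
  "HCPCS - DME",
  "HCPCS - Procedures/Services",
  "HCPCS - Behavioral Health",
  "HCPCS - Drugs",
  "HCPCS - DME (Temporary)",
  "HCPCS - Orthotics/Prosthetics",
  "HCPCS - Quality Measures",
  "HCPCS - Laboratory",
  "HCPCS - Temporary Codes",
  "HCPCS - Diagnostic Radiology",
  "HCPCS - Private Payer",
  "HCPCS - State Medicaid",
  "HCPCS - Coronavirus",
  "HCPCS - Vision/Hearing"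
]

-- `ans = "Other"; for b, c in _STEPS: if num >= b: ans = c; return ans`
def foldStepB (num : Int) (ans : String) (p : Int × String) : String :=
  if p.1 ≤ num then p.2 else ans

def get_category_for_code_alt (hcpcs_code : String) : String :=
  match PySem.Int.ofStr? hcpcs_code with
  | some num => stepsB.foldl (foldStepB num) "Other"
  | none =>
    if hcpcs_code.toList = [] then "Other"
    else
      match PySem.Str.pyGet? hcpcs_code 0 with
      | some c =>
        let i : Int := PySem.Str.find prefixKeysB (PySem.Str.upper (String.ofList [c]))
        if 0 ≤ i then
          match PySem.List.pyGet? prefixValsB i with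
          | some v => v
          | none => "Other"   -- unreachable: find into an 18-key string indexes an 18-entry list
        else "Other"
      | none => "Other"       -- unreachable: the string is nonempty

-- ===== PRECONDITION & SPEC =====
def Spec_get_category_for_code (hcpcs_code : String) (out : String) : Prop := out = get_category_for_code_alt hcpcs_code
instance (hcpcs_code : String) (out : String) : Decidable (Spec_get_category_for_code hcpcs_code out) := by unfold Spec_get_category_for_code; infer_instance

-- ===== CLAIM =====
def Claim_equal_get_category_for_code : Prop := ∀ (hcpcs_code : String), Dom_get_category_for_code hcpcs_code → Spec_get_category_for_code hcpcs_code (get_category_for_code hcpcs_code)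

-- ===== LEMMAS AND PROOFS =====

-- if no range matches, A's scan returns "Other"
theorem findCatA_other (L : List (Int × Int × String)) (n : Int)
    (h : ∀ r ∈ L, ¬ (r.1 ≤ n ∧ n ≤ r.2.1)) : findCatA L n = "Other" := by
  induction L with
  | nil => rfl
  | cons r rest ih =>
    obtain ⟨lo, hi, cat⟩ := r
    simp only [findCatA]
    rw [if_neg (h _ (List.mem_cons_self))]
    exact ih fun r hr => h r (List.mem_cons_of_mem _ hr)

-- if every step boundary lies above n, B's fold keeps its accumulator
theorem fold_above (S : List (Int × String)) (n : Int) (acc : String)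
    (h : ∀ p ∈ S, n < p.1) : S.foldl (foldStepB n) acc = acc := by
  induction S generalizing acc with
  | nil => rfl
  | cons p rest ih =>
    simp only [List.foldl_cons, foldStepB]
    rw [if_neg (by have := h p List.mem_cons_self; omega)]
    exact ih acc fun q hq => h q (List.mem_cons_of_mem _ hq)

-- boundaries produced by a tail whose lower bounds exceed b are all above n ≤ b
theorem steps_above (L : List (Int × Int × String)) (n b : Int) (hn : n ≤ b)
    (hlo : ∀ r ∈ L, b < r.1) (hwf : ∀ r ∈ L, r.1 ≤ r.2.1) :
    ∀ p ∈ L.flatMap stepsOfB, n < p.1 := by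
  intro p hp
  obtain ⟨r, hr, hpr⟩ := List.mem_flatMap.mp hp
  have h1 := hlo r hr
  have h2 := hwf r hr
  simp only [stepsOfB, List.mem_cons, List.not_mem_nil, or_false] at hpr
  rcases hpr with rfl | rfl <;> simp <;> omega

-- core: on a sorted, well-formed range table the early-return scan equals the step fold
theorem scan_eq_fold (L : List (Int × Int × String)) (n : Int)
    (hord : List.Pairwise (fun a b => a.2.1 < b.1) L)
    (hwf : ∀ r ∈ L, r.1 ≤ r.2.1) :
    findCatA L n = (L.flatMap stepsOfB).foldl (foldStepB n) "Other" := by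
  induction L with
  | nil => rfl
  | cons r rest ih =>
    obtain ⟨lo, hi, cat⟩ := r
    have hlo : lo ≤ hi := hwf _ List.mem_cons_self
    have hrest_lo : ∀ q ∈ rest, hi < q.1 := by
      intro q hq; exact (List.pairwise_cons.mp hord).1 q hq
    have hrest_wf : ∀ q ∈ rest, q.1 ≤ q.2.1 := fun q hq => hwf q (List.mem_cons_of_mem _ hq)
    simp only [List.flatMap_cons, List.foldl_append, stepsOfB, List.foldl_cons, List.foldl_nil,
      findCatA, foldStepB]
    by_cases h1 : lo ≤ n
    · rw [if_pos h1]
      by_cases h2 : n ≤ hi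
      · rw [if_pos ⟨h1, h2⟩, if_neg (by omega)]
        exact (fold_above _ n cat (steps_above rest n hi h2 hrest_lo hrest_wf)).symm
      · rw [if_neg (by omega), if_pos (by omega)]
        exact (ih (List.pairwise_cons.mp hord).2 hrest_wf)
    · rw [if_neg h1, if_neg (by omega), if_neg (by omega)]
      rw [findCatA_other rest n (fun q hq => by have := hrest_lo q hq; omega)]
      exact (fold_above _ n "Other" (steps_above rest n lo (by omega)
        (fun q hq => by have := hrest_lo q hq; omega) hrest_wf)).symm

-- the literal table is sorted and well-formed
theorem table_ord : List.Pairwise (fun a b : Int × Int × String => a.2.1 < b.1) CATEGORY_RANGES := by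
  decide

theorem table_wf : ∀ r ∈ CATEGORY_RANGES, r.1 ≤ r.2.1 := by decide

-- the dict lookup and the find-indexed value list agree on every ASCII first character
set_option maxRecDepth 4000 in
theorem prefix_eq_aux : ∀ m ∈ List.range 127,
    prefixDictA.getD (PySem.Str.upper (String.ofList [Char.ofNat m])) "Other" =
      (let i : Int := PySem.Str.find prefixKeysB (PySem.Str.upper (String.ofList [Char.ofNat m]))
       if 0 ≤ i then
         match PySem.List.pyGet? prefixValsB i with
         | some v => v
         | none => "Other"
       else "Other") := by decide

theorem prefix_eq (c : Char) (hc : c.toNat ≤ 126) :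
    prefixDictA.getD (PySem.Str.upper (String.ofList [c])) "Other" =
      (let i : Int := PySem.Str.find prefixKeysB (PySem.Str.upper (String.ofList [c]))
       if 0 ≤ i then
         match PySem.List.pyGet? prefixValsB i with
         | some v => v
         | none => "Other"
       else "Other") := by
  have h := prefix_eq_aux c.toNat (List.mem_range.mpr (by omega))
  rwa [Char.ofNat_toNat] at h

-- ===== VERDICT =====
theorem get_category_for_code_spec : Claim_equal_get_category_for_code := by
  intro s hdom
  unfold Spec_get_category_for_code get_category_for_code get_category_for_code_alt
  cases h : PySem.Int.ofStr? s with
  | some num => exact scan_eq_fold CATEGORY_RANGES num table_ord table_wf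
  | none =>
    cases hs : s.toList with
    | nil => simp [prefixOfA, hs]; decide
    | cons c cs =>
      have hc : c.toNat ≤ 126 := by
        have hmem : c ∈ s.toList := by rw [hs]; exact List.mem_cons_self
        have := List.all_eq_true.mp hdom c hmem
        simp only [pvDomChar, Bool.or_eq_true, Bool.and_eq_true, decide_eq_true_eq,
          beq_iff_eq] at this
        omega
      have hget : PySem.Str.pyGet? s 0 = some c := by
        simp [hs]
      simp only [prefixOfA, hs, reduceCtorEq, ite_false, hget]
      exact prefix_eq c hc
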